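-- pv_equiv track=rewrite | github.com/grahama1970/agent-skills | skills/movie-ingest/movie_ingest.py | release_has_subtitle_hint
-- ===== SOURCE A (Python) =====
-- SUBTITLE_HINT_KEYWORDS = (" subs", "subbed", "subtitle", "subtitles", ".srt", "cc", "sdh", "caption")
--
-- def release_has_subtitle_hint(item: dict) -> bool:
--     haystack = " ".join(
--         [
--             str(item.get("title", "")),
--             str(item.get("description", "")),
--             str(item.get("attr", "")),
--         ]
--     ).lower()
--     return any(keyword in haystack for keyword in SUBTITLE_HINT_KEYWORDS)
-- ===== SOURCE B (Python) =====
-- SUBTITLE_HINT_KEYWORDS = (" subs", "subbed", "subtitle", "subtitles", ".srt", "cc", "sdh", "caption")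
--
-- def release_has_subtitle_hint(item: dict) -> bool:
--     haystack = " ".join(
--         [
--             str(item.get("title", "")),
--             str(item.get("description", "")),
--             str(item.get("attr", "")),
--         ]
--     ).lower()
--     # position-major scan: walk the suffixes of the haystack once and test
--     # every keyword as a prefix at each position (instead of one full
--     # substring search per keyword)
--     suffix = haystack
--     while suffix:
--         for keyword in SUBTITLE_HINT_KEYWORDS:
--             if suffix.startswith(keyword):
--                 return True
--         suffix = suffix[1:]
--     return False
-- ===== Notes on version B (the rewrite author's own statement) =====
-- stated objective: alternative
-- what changed: Replaces the keyword-major any(k in haystack) with a position-major single walk over the haystack's suffixes that tests each keyword as a prefix at every position.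
import Mathlib
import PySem

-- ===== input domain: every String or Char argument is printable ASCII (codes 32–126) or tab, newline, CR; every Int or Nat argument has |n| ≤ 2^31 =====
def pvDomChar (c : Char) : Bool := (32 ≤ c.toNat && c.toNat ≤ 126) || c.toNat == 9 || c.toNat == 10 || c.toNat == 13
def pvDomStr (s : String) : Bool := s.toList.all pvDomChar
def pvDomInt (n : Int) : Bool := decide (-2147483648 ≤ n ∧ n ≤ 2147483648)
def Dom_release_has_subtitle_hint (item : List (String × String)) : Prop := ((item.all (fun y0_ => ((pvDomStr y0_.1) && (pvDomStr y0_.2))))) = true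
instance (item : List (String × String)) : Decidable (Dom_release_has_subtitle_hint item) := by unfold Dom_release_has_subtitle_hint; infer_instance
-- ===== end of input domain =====

-- B replaces the keyword-major substring test with a single position-major walk over the haystack's suffixes (alternative decomposition, same cost).


-- ===== PORT A =====
def SUBTITLE_HINT_KEYWORDS : List String :=
  [" subs", "subbed", "subtitle", "subtitles", ".srt", "cc", "sdh", "caption"]

def release_has_subtitle_hint (item : List (String × String)) : Bool :=
  let d := PySem.Dict.mk item
  let haystack := PySem.Str.lower (PySem.Str.join " "
    [d.getD "title" "", d.getD "description" "", d.getD "attr" ""])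
  SUBTITLE_HINT_KEYWORDS.any (fun keyword => PySem.Str.isIn keyword haystack)

-- ===== PORT B =====
-- the while-loop over suffixes of Source B, as structural recursion on the char list
def pvSuffixScan : List Char → Bool
  | [] => false
  | c :: rest =>
    if SUBTITLE_HINT_KEYWORDS.any (fun keyword => PySem.Chars.startswith (c :: rest) keyword.toList)
    then true
    else pvSuffixScan rest

def release_has_subtitle_hint_alt (item : List (String × String)) : Bool :=
  let d := PySem.Dict.mk item
  let haystack := PySem.Str.lower (PySem.Str.join " "
    [d.getD "title" "", d.getD "description" "", d.getD "attr" ""])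
  pvSuffixScan haystack.toList

-- ===== PRECONDITION & SPEC =====
def Spec_release_has_subtitle_hint (item : List (String × String)) (out : Bool) : Prop := out = release_has_subtitle_hint_alt item
instance (item : List (String × String)) (out : Bool) : Decidable (Spec_release_has_subtitle_hint item out) := by unfold Spec_release_has_subtitle_hint; infer_instance

-- ===== CLAIM (what is proved, stated in full; the proofs are below) =====
def Claim_equal_release_has_subtitle_hint : Prop := ∀ (item : List (String × String)), Dom_release_has_subtitle_hint item → Spec_release_has_subtitle_hint item (release_has_subtitle_hint item)

-- ===== LEMMAS AND PROOFS =====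

theorem pv_any_or {α : Type} (xs : List α) (f g : α → Bool) :
    xs.any (fun x => f x || g x) = (xs.any f || xs.any g) := by
  induction xs with
  | nil => simp
  | cons a t ih => simp [List.any_cons, ih]; ac_rfl

theorem pv_isIn_cons (sub : List Char) (c : Char) (rest : List Char) :
    PySem.Chars.isIn sub (c :: rest)
      = (PySem.Chars.startswith (c :: rest) sub || PySem.Chars.isIn sub rest) := by
  rw [Bool.eq_iff_iff]
  simp only [Bool.or_eq_true, PySem.Chars.isIn_iff_infix, PySem.Chars.startswith_iff]
  exact List.infix_cons_iff

theorem pv_scan_eq (l : List Char) :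
    pvSuffixScan l = SUBTITLE_HINT_KEYWORDS.any (fun k => PySem.Chars.isIn k.toList l) := by
  induction l with
  | nil => decide
  | cons c rest ih =>
    simp only [pvSuffixScan, pv_isIn_cons,
      pv_any_or SUBTITLE_HINT_KEYWORDS (fun k => PySem.Chars.startswith (c :: rest) k.toList)
        (fun k => PySem.Chars.isIn k.toList rest), ← ih]
    by_cases h : SUBTITLE_HINT_KEYWORDS.any (fun k => PySem.Chars.startswith (c :: rest) k.toList) = true
    · simp [h]
    · simp [h]

-- ===== VERDICT (by name: the statement is the Claim_ definition above) =====
theorem release_has_subtitle_hint_spec : Claim_equal_release_has_subtitle_hint := by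
  intro item _
  unfold Spec_release_has_subtitle_hint release_has_subtitle_hint release_has_subtitle_hint_alt
  simp only [pv_scan_eq, PySem.Str.isIn_eq]
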